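-- pv_equiv track=rewrite | github.com/celycodes/avaliacoes-prog1-uespi | prova 1/prob4.py | get_m
-- ===== SOURCE A (Python) =====
-- def e_m(listas):
--     resto = listas[0][0] % 2
--
--     for lista in listas:
--         for n in lista:
--             if n % 2 != resto:
--                 return False
--         resto = 1 if resto == 0 else 0
--     return True
--
-- def get_m(lista):
--     m = 1
--     total = 0
--     listas = []
--     while total < len(lista):
--         listas.append(lista[total:total+m])
--         total += m
--         m += 1
--     return m-1 if e_m(listas) else 0
-- ===== SOURCE B (Python) =====
-- def get_m(lista):
--     expected = lista[0] % 2
--     size = 1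
--     remaining = 1
--     count = 0
--     for n in lista:
--         if n % 2 != expected:
--             return 0
--         remaining -= 1
--         if remaining == 0:
--             expected = 1 - expected
--             count += 1
--             size += 1
--             remaining = size
--     return count if remaining == size else count + 1
-- ===== Notes on version B (the rewrite author's own statement) =====
-- stated objective: alternative
-- what changed: B inlines the helper and replaces A's two-phase algorithm (materialize the triangular chunks as sliced sublists, then re-scan them for alternating parity) by a single flat scan that maintains the remaining-slot counter, expected parity and chunk count, never building any intermediate list.
-- outside the precondition, e.g. on get_m([]): A raises IndexError, B raises IndexError
import Mathlib
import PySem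

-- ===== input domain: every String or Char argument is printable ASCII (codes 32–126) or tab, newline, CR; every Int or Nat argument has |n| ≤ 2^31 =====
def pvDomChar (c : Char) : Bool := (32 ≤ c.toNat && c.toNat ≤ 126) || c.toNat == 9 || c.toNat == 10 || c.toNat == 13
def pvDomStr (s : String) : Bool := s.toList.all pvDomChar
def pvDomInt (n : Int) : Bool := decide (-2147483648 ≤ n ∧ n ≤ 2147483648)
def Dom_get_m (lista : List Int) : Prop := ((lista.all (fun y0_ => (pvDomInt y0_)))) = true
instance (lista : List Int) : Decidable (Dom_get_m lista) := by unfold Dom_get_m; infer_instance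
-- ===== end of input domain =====

-- B replaces A's build-chunks-then-rescan with one flat scan keeping a slot counter (alternative decomposition, same O(n)).
-- Both A and B raise IndexError on the empty list (lista[0] / listas[0][0]); Pre_ excludes exactly that input.

-- ===== PORT A =====
-- e_m's nested for-loops with early `return False`; the inner loop is `all`, the outer one recursion on listas
def e_m_go (listas : List (List Int)) (resto : Int) : Bool :=
  match listas with
  | [] => true
  | l :: rest =>
      if l.all (fun n => PySem.Int.mod n 2 == resto) then
        e_m_go rest (if resto == 0 then 1 else 0)
      else false

-- `resto = listas[0][0] % 2` raises IndexError when listas (or listas[0]) is empty; the port returns false there (excluded by Pre_)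
def e_m (listas : List (List Int)) : Bool :=
  match PySem.List.pyGet? listas 0 with
  | none => false
  | some l0 =>
    match PySem.List.pyGet? l0 0 with
    | none => false
    | some x => e_m_go listas (PySem.Int.mod x 2)

-- A's while loop; fuel bounds the iteration count (total grows by m ≥ 1 each step, so lista.length + 1 steps always suffice)
def get_m_build (fuel : Nat) (lista : List Int) (m total : Int) (listas : List (List Int)) :
    Int × List (List Int) :=
  match fuel with
  | 0 => (m, listas)
  | fuel + 1 =>
    if total < (lista.length : Int) then
      get_m_build fuel lista (m + 1) (total + m)
        (listas ++ [PySem.List.slice lista (some total) (some (total + m))])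
    else (m, listas)

def get_m (lista : List Int) : Int :=
  let r := get_m_build (lista.length + 1) lista 1 0 []
  if e_m r.2 then r.1 - 1 else 0

-- ===== PORT B =====
-- B's single for-loop over lista with state (expected, size, remaining, count)
def get_m_alt_go (xs : List Int) (expected size remaining count : Int) : Int :=
  match xs with
  | [] => if remaining == size then count else count + 1
  | n :: rest =>
    if PySem.Int.mod n 2 != expected then 0
    else
      if remaining - 1 == 0 then
        get_m_alt_go rest (1 - expected) (size + 1) (size + 1) (count + 1)
      else
        get_m_alt_go rest expected size (remaining - 1) count

-- `lista[0]` raises IndexError on the empty list; the port returns 0 there (excluded by Pre_)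
def get_m_alt (lista : List Int) : Int :=
  match PySem.List.pyGet? lista 0 with
  | none => 0
  | some x => get_m_alt_go lista (PySem.Int.mod x 2) 1 1 0

-- ===== PRECONDITION & SPEC =====
-- A raises IndexError on [] (listas[0][0] in e_m); B raises IndexError there too (lista[0]); everything else is admitted.
def Pre_get_m (lista : List Int) : Prop := lista ≠ []
instance (lista : List Int) : Decidable (Pre_get_m lista) := by unfold Pre_get_m; infer_instance
def pvWitness_get_m : List Int := [1, 2, 4]

def Spec_get_m (lista : List Int) (out : Int) : Prop := out = get_m_alt lista
instance (lista : List Int) (out : Int) : Decidable (Spec_get_m lista out) := by unfold Spec_get_m; infer_instance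

-- ===== CLAIM (what is proved, stated in full; the proofs are below) =====
def Claim_equal_get_m : Prop := ∀ (lista : List Int), Dom_get_m lista → Pre_get_m lista → Spec_get_m lista (get_m lista)

-- ===== LEMMAS AND PROOFS =====

-- the triangular chunk decomposition of xs starting with chunk size s (s ≥ 1 intended)
def chunksFrom : List Int → Nat → List (List Int)
  | [], _ => []
  | x :: rest, s => ((x :: rest).take s) :: chunksFrom (rest.drop (s - 1)) (s + 1)
  termination_by xs _ => xs.length
  decreasing_by simp

-- chunk decomposition when the current chunk has `rem` of its `size` slots left
def chunksMid (xs : List Int) (rem size : Nat) : List (List Int) :=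
  match xs with
  | [] => []
  | _ :: _ => xs.take rem :: chunksFrom (xs.drop rem) (size + 1)

theorem chunksFrom_nil (s : Nat) : chunksFrom [] s = [] := by
  simp [chunksFrom]

theorem chunksFrom_nonempty (x : Int) (rest : List Int) (s : Nat) (h : 1 ≤ s) :
    chunksFrom (x :: rest) s = (x :: rest).take s :: chunksFrom ((x :: rest).drop s) (s + 1) := by
  have hd : (x :: rest).drop s = rest.drop (s - 1) := by
    cases s with
    | zero => omega
    | succ k => simp
  simp only [chunksFrom]
  rw [hd]

theorem chunksMid_self (xs : List Int) (s : Nat) (h : 1 ≤ s) :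
    chunksMid xs s s = chunksFrom xs s := by
  cases xs with
  | nil => simp [chunksMid, chunksFrom_nil]
  | cons x rest =>
    simp only [chunksMid]
    exact (chunksFrom_nonempty x rest s h).symm

theorem build_eq_chunks (lista : List Int) :
    ∀ (fuel t m : Nat) (acc : List (List Int)), 1 ≤ m → lista.length - t ≤ fuel →
    get_m_build fuel lista (m : Int) (t : Int) acc =
      ((m : Int) + (chunksFrom (lista.drop t) m).length, acc ++ chunksFrom (lista.drop t) m) := by
  intro fuel
  induction fuel with
  | zero =>
    intro t m acc hm hf
    have ht : lista.length ≤ t := by omega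
    have hd : lista.drop t = [] := by simp [List.drop_eq_nil_iff]; omega
    simp [get_m_build, hd, chunksFrom_nil]
  | succ fuel ih =>
    intro t m acc hm hf
    rw [get_m_build]
    by_cases ht : t < lista.length
    · have hlt : (t : Int) < (lista.length : Int) := by exact_mod_cast ht
      rw [if_pos hlt]
      have hslice : PySem.List.slice lista (some (t : Int)) (some ((t : Int) + (m : Int))) =
          (lista.drop t).take m := PySem.List.slice_natCast_add lista t m
      have hcast1 : ((m : Int) + 1) = ((m + 1 : Nat) : Int) := by push_cast; ring
      have hcast2 : ((t : Int) + (m : Int)) = ((t + m : Nat) : Int) := by push_cast; ring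
      rw [hslice, hcast1, hcast2, ih (t + m) (m + 1) _ (by omega) (by omega)]
      -- unfold one step of chunksFrom on the nonempty lista.drop t
      have hne : lista.drop t ≠ [] := by
        simp [List.drop_eq_nil_iff]; omega
      obtain ⟨x, rest, hx⟩ := List.exists_cons_of_ne_nil hne
      have hdd : lista.drop (t + m) = (lista.drop t).drop m := by
        rw [List.drop_drop]
      rw [hdd, hx, chunksFrom_nonempty x rest m hm]
      simp only [Prod.mk.injEq, List.length_cons]
      refine ⟨?_, ?_⟩
      · omega
      · simp
    · have hge : ¬ (t : Int) < (lista.length : Int) := by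
        intro h; exact ht (by exact_mod_cast h)
      rw [if_neg hge]
      have hd : lista.drop t = [] := by simp [List.drop_eq_nil_iff]; omega
      simp [hd, chunksFrom_nil]

theorem mod_two_cases (n : Int) : PySem.Int.mod n 2 = 0 ∨ PySem.Int.mod n 2 = 1 := by
  have h1 := PySem.Int.mod_nonneg n (b := 2) (by omega)
  have h2 := PySem.Int.mod_lt n (b := 2) (by omega)
  omega

theorem altgo_eq_e_m_go (xs : List Int) :
    ∀ (rem size : Nat) (r count : Int), (r = 0 ∨ r = 1) → 1 ≤ rem → rem ≤ size →
    get_m_alt_go xs r (size : Int) (rem : Int) count =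
      (if e_m_go (chunksMid xs rem size) r
       then count + (chunksMid xs rem size).length + (if xs = [] ∧ rem ≠ size then 1 else 0)
       else 0) := by
  induction xs with
  | nil =>
    intro rem size r count hr h1 h2
    simp only [get_m_alt_go, chunksMid, e_m_go, if_true, List.length_nil]
    by_cases h : rem = size
    · subst h; simp
    · have : ¬ ((rem : Int) == (size : Int)) = true := by
        simp; omega
      simp [this, h]
  | cons n rest ih =>
    intro rem size r count hr h1 h2
    have hxne : (n :: rest : List Int) ≠ [] := by simp
    rw [get_m_alt_go]
    have htake : (n :: rest).take rem = n :: rest.take (rem - 1) := by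
      cases rem with
      | zero => omega
      | succ k => simp
    have hdrop : (n :: rest).drop rem = rest.drop (rem - 1) := by
      cases rem with
      | zero => omega
      | succ k => simp
    by_cases hp : PySem.Int.mod n 2 = r
    · have hpe : n % 2 = r := by
        rw [← PySem.Int.mod_eq_emod_of_pos (by omega : (0:Int) < 2)]; exact hp
      have hcond : (PySem.Int.mod n 2 != r) = false := by simp [hpe]
      rw [hcond]
      simp only [Bool.false_eq_true, if_false]
      by_cases hrem1 : rem = 1
      · subst hrem1
        have hz : ((1 : Nat) : Int) - 1 == 0 := by decide
        simp only [Nat.cast_one] at hz ⊢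
        rw [if_pos (by simp)]
        have hflip : (if (r == (0:Int)) = true then (1:Int) else 0) = 1 - r := by
          rcases hr with h | h <;> subst h <;> decide
        have hcs : ((size : Int) + 1) = ((size + 1 : Nat) : Int) := by push_cast; ring
        rw [hcs, ih (size + 1) (size + 1) (1 - r) (count + 1)
            (by rcases hr with h | h <;> subst h <;> [right; left] <;> ring) (by omega) (le_refl _)]
        rw [chunksMid_self _ _ (by omega)]
        -- left side goal: describe chunksMid (n::rest) 1 size
        have hcm : chunksMid (n :: rest) 1 size = [n] :: chunksFrom rest (size + 1) := by
          simp [chunksMid]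
        rw [hcm]
        have hall : ([n].all (fun m => PySem.Int.mod m 2 == r)) = true := by simp [hpe]
        rw [e_m_go, if_pos hall, hflip]
        by_cases hok : e_m_go (chunksFrom rest (size + 1)) (1 - r)
        · rw [if_pos hok, if_pos hok]
          simp
          ring
        · rw [if_neg hok, if_neg hok]
      · -- rem ≥ 2
        have hrem2 : 2 ≤ rem := by omega
        have hz : ((rem : Int) - 1 == 0) = false := by simp; omega
        rw [hz]
        simp only [Bool.false_eq_true, if_false]
        have hc1 : (rem : Int) - 1 = ((rem - 1 : Nat) : Int) := by omega
        rw [hc1, ih (rem - 1) size r count hr (by omega) (by omega)]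
        have hcm : chunksMid (n :: rest) rem size =
            (n :: rest.take (rem - 1)) :: chunksFrom (rest.drop (rem - 1)) (size + 1) := by
          rw [chunksMid, htake, hdrop]
        cases rest with
        | nil =>
          rw [hcm]
          have hne : rem - 1 ≠ size := by omega
          simp [chunksMid, chunksFrom_nil, e_m_go, hpe, hne]
        | cons y ys =>
          rw [hcm, chunksMid, e_m_go, e_m_go]
          simp only [List.all_cons, hp, beq_self_eq_true, Bool.true_and, List.length_cons]
          simp
    · have hpe : ¬ n % 2 = r := by
        rw [← PySem.Int.mod_eq_emod_of_pos (by omega : (0:Int) < 2)]; exact hp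
      have hcond : (PySem.Int.mod n 2 != r) = true := by simp [hpe]
      rw [hcond]
      simp only [if_true]
      have hcm : chunksMid (n :: rest) rem size =
          (n :: rest.take (rem - 1)) :: chunksFrom (rest.drop (rem - 1)) (size + 1) := by
        rw [chunksMid, htake, hdrop]
      have hfalse : e_m_go (chunksMid (n :: rest) rem size) r = false := by
        rw [hcm, e_m_go]
        simp [hpe]
      rw [hfalse]
      simp

-- ===== VERDICT (by name: the statement is the Claim_ definition above) =====
theorem get_m_spec : Claim_equal_get_m := by
  unfold Claim_equal_get_m
  intro lista _ hpre
  unfold Spec_get_m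
  cases lista with
  | nil => exact absurd rfl hpre
  | cons x rest =>
    have hr := mod_two_cases x
    -- A side: the while loop builds exactly the triangular chunks
    have hbuild := build_eq_chunks (x :: rest) ((x :: rest).length + 1) 0 1 [] (by omega) (by omega)
    simp only [Nat.cast_one, Nat.cast_zero, List.drop_zero, List.nil_append] at hbuild
    have hC : chunksFrom (x :: rest) 1 = [x] :: chunksFrom rest 2 := by
      rw [chunksFrom_nonempty x rest 1 (by omega)]
      simp
    have hem : e_m (chunksFrom (x :: rest) 1) =
        e_m_go (chunksFrom (x :: rest) 1) (PySem.Int.mod x 2) := by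
      rw [hC]
      simp [e_m]
    -- B side: the flat scan computes the same chunk check and count
    have halt := altgo_eq_e_m_go (x :: rest) 1 1 (PySem.Int.mod x 2) 0 hr (by omega) (le_refl 1)
    rw [chunksMid_self _ 1 (by omega)] at halt
    simp only [Nat.cast_one] at halt
    simp only [get_m, get_m_alt, PySem.List.pyGet?_zero_cons, hbuild, halt, hem]
    by_cases he : e_m_go (chunksFrom (x :: rest) 1) (PySem.Int.mod x 2) = true
    · simp
    · simp
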